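-- pv_equiv track=rewrite | github.com/WycliffeAssociates/biel-files-index | main.py | calculate_sort_field
-- ===== SOURCE A (Python) =====
-- def calculate_sort_field(path_parts, filename_root, books):
--     """ Calculate where this item should be sorted.  Returns a string that
--         can be used to naturally sort the files.
--
--         books is a dictionary (defined in languages.json) where the key is
--         the book name, and has a field "num" which can be used to sort in
--         canonical order.
--         """
--
--     # Create index of book names in order from longest to shortest.  This
--     # is to ensure that books with shorter similar names don't accidentally
--     # get matched before longer ones, e.g. "1 John" being matches as
--     # "John".
--     book_names_by_length = sorted(list(books), key=len, reverse=True)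
--
--     # If the filename contains a book of the Bible, sort in canonical order
--     book_number = "00-"
--     for book in book_names_by_length:
--         if book in filename_root:
--             book_number = str(books[book]["num"]).zfill(2) + "-"
--             break
--
--     # Sort shallower items before deeper ones, then by directory
--     sort = str(len(path_parts)) + "-" + \
--             "/".join(path_parts[2:] + (book_number + filename_root,))
--
--     return sort
-- ===== SOURCE B (Python) =====
-- def calculate_sort_field(path_parts, filename_root, books):
--     """Single scan over books in native order collecting substring matches,
--     then max(key=len) picks the longest (first of maximal length)."""
--     matches = [book for book in books if book in filename_root]
--     book_number = "00-"
--     if matches: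
--         best = max(matches, key=len)
--         book_number = str(books[best]["num"]).zfill(2) + "-"
--     return str(len(path_parts)) + "-" + \
--         "/".join(path_parts[2:] + (book_number + filename_root,))
-- ===== Notes on version B (the rewrite author's own statement) =====
-- stated objective: simpler
-- what changed: Drops A's sort-all-book-names-by-length-descending pre-pass and first-match break loop; B does one scan over the books in native order collecting every name that occurs in filename_root and picks the longest with max(key=len), whose first-of-maximal-length tie-break matches A's stable sort.
import Mathlib
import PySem

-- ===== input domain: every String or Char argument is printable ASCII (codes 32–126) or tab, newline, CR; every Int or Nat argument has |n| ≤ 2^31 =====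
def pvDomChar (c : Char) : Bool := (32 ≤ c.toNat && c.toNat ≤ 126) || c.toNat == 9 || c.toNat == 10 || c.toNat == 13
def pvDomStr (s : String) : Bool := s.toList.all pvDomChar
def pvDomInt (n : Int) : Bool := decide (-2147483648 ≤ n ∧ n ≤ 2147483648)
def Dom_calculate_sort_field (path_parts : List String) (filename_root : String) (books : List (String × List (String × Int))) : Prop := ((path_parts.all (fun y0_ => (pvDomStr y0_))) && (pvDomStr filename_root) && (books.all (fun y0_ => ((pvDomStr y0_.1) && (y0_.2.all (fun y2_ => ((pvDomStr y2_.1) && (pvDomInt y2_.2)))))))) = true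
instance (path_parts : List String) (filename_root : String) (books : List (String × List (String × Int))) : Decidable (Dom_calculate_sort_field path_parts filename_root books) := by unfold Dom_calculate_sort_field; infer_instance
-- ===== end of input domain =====

-- B replaces A's sort-by-length-descending pre-pass + first-match loop with one filter over the
-- books in native order and max(key=len) (same longest-match result, simpler; return value only).


-- ===== PORT A =====
-- the 'for book in book_names_by_length: if book in filename_root: …; break' loop of A
def pvFindBookA (filename_root : String) (bd : PySem.Dict String (List (String × Int))) : List String → String
  | [] => "00-"
  | book :: rest =>
    if PySem.Str.isIn book filename_root then
      PySem.Str.zfill (PySem.Int.toStr ((PySem.Dict.ofList (bd.getD book [])).getD "num" 0)) 2 ++ "-"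
    else pvFindBookA filename_root bd rest

def calculate_sort_field (path_parts : List String) (filename_root : String) (books : List (String × List (String × Int))) : String :=
  let bd := PySem.Dict.ofList books
  let book_names_by_length := PySem.List.sorted bd.keys PySem.Str.len true
  let book_number := pvFindBookA filename_root bd book_names_by_length
  PySem.Int.toStr (path_parts.length : Int) ++ "-" ++
    PySem.Str.join "/" (PySem.List.slice path_parts (some 2) none ++ [book_number ++ filename_root])

-- ===== PORT B =====
def calculate_sort_field_alt (path_parts : List String) (filename_root : String) (books : List (String × List (String × Int))) : String :=
  let bd := PySem.Dict.ofList books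
  let matched := bd.keys.filter (fun book => PySem.Str.isIn book filename_root)
  let book_number :=
    match PySem.List.max? matched PySem.Str.len with
    | none => "00-"
    | some best => PySem.Str.zfill (PySem.Int.toStr ((PySem.Dict.ofList (bd.getD best [])).getD "num" 0)) 2 ++ "-"
  PySem.Int.toStr (path_parts.length : Int) ++ "-" ++
    PySem.Str.join "/" (PySem.List.slice path_parts (some 2) none ++ [book_number ++ filename_root])

-- ===== PRECONDITION & SPEC =====
-- Pre_ excludes exactly the inputs where the selected book — the first entry (in dict order) of
-- maximal length among the book names occurring in filename_root — has no "num" key: there both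
-- Python A and Python B raise KeyError (on every other input A returns normally and B matches it).
def Pre_calculate_sort_field (path_parts : List String) (filename_root : String) (books : List (String × List (String × Int))) : Prop :=
  let items := (PySem.Dict.ofList books).items
  ∀ i, (hi : i < items.length) →
    PySem.Str.isIn items[i].1 filename_root = true →
    (∀ q ∈ items, PySem.Str.isIn q.1 filename_root = true → PySem.Str.len q.1 ≤ PySem.Str.len items[i].1) →
    (∀ j, (hj : j < items.length) → j < i → PySem.Str.isIn items[j].1 filename_root = true → PySem.Str.len items[j].1 < PySem.Str.len items[i].1) →
    (PySem.Dict.ofList items[i].2).contains "num" = true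
instance (path_parts : List String) (filename_root : String) (books : List (String × List (String × Int))) : Decidable (Pre_calculate_sort_field path_parts filename_root books) := by unfold Pre_calculate_sort_field; infer_instance

def pvWitness_calculate_sort_field : List String × String × (List (String × List (String × Int))) :=
  (["en", "bibles", "ulb"], "01-1 John", [("John", [("num", 43)]), ("1 John", [("num", 62)])])

def Spec_calculate_sort_field (path_parts : List String) (filename_root : String) (books : List (String × List (String × Int))) (out : String) : Prop := out = calculate_sort_field_alt path_parts filename_root books
instance (path_parts : List String) (filename_root : String) (books : List (String × List (String × Int))) (out : String) : Decidable (Spec_calculate_sort_field path_parts filename_root books out) := by unfold Spec_calculate_sort_field; infer_instance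

-- ===== CLAIM (what is proved, stated in full; the proofs are below) =====
def Claim_equal_calculate_sort_field : Prop := ∀ (path_parts : List String) (filename_root : String) (books : List (String × List (String × Int))), Dom_calculate_sort_field path_parts filename_root books → Pre_calculate_sort_field path_parts filename_root books → Spec_calculate_sort_field path_parts filename_root books (calculate_sort_field path_parts filename_root books)

-- ===== LEMMAS AND PROOFS =====

-- x inserted into a list whose every key is strictly below key x goes to the front
theorem pv_insertBy_all_lt {α κ : Type} [LinearOrder κ] (key : α → κ) (x : α) (l : List α)
    (h : ∀ z ∈ l, key z < key x) :
    PySem.List.insertBy (fun a b => decide (key b < key a)) x l = x :: l := by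
  cases l with
  | nil => rfl
  | cons y ys =>
    simp [PySem.List.insertBy, h y (List.mem_cons_self)]

-- filtering commutes with one insertion step into a key-descending list
theorem pv_filter_insertBy {α κ : Type} [LinearOrder κ] (key : α → κ) (P : α → Bool) (x : α) :
    ∀ l : List α, l.Pairwise (fun a b => key b ≤ key a) →
    (PySem.List.insertBy (fun a b => decide (key b < key a)) x l).filter P =
      (if P x then PySem.List.insertBy (fun a b => decide (key b < key a)) x (l.filter P)
       else l.filter P) := by
  intro l
  induction l with
  | nil =>
    intro _
    by_cases hx : P x <;> simp [PySem.List.insertBy, List.filter_cons, hx]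
  | cons y ys ih =>
    intro hp
    have hpy := (List.pairwise_cons.mp hp).1
    have hps := (List.pairwise_cons.mp hp).2
    by_cases hlt : key y < key x
    · have hall : ∀ z ∈ (y :: ys).filter P, key z < key x := by
        intro z hz
        have hzmem := List.mem_of_mem_filter hz
        rcases List.mem_cons.mp hzmem with h1 | h2
        · exact h1 ▸ hlt
        · exact lt_of_le_of_lt (hpy z h2) hlt
      have hins : PySem.List.insertBy (fun a b => decide (key b < key a)) x (y :: ys) =
          x :: y :: ys := by
        simp [PySem.List.insertBy, hlt]
      rw [hins, pv_insertBy_all_lt key x ((y :: ys).filter P) hall]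
      by_cases hx : P x <;> simp [List.filter_cons, hx]
    · have hib : PySem.List.insertBy (fun a b => decide (key b < key a)) x (y :: ys) =
          y :: PySem.List.insertBy (fun a b => decide (key b < key a)) x ys := by
        simp [PySem.List.insertBy, hlt]
      rw [hib]
      by_cases hy : P y
      · by_cases hx : P x
        · have : PySem.List.insertBy (fun a b => decide (key b < key a)) x ((y :: ys).filter P) =
              y :: PySem.List.insertBy (fun a b => decide (key b < key a)) x (ys.filter P) := by
            simp [List.filter_cons, hy, PySem.List.insertBy, hlt]
          rw [List.filter_cons_of_pos hy, this, ih hps]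
          simp [hx, List.filter_cons, hy]
        · rw [List.filter_cons_of_pos hy, ih hps]
          simp [hx, List.filter_cons, hy]
      · rw [List.filter_cons_of_neg hy, ih hps]
        by_cases hx : P x <;> simp [hx, List.filter_cons, hy]

-- sorted(xs ++ [x]) is one insertion into sorted(xs)  (reverse=True)
theorem pv_sorted_rev_append_singleton {α κ : Type} [LT κ] [DecidableLT κ] (key : α → κ)
    (xs : List α) (x : α) :
    PySem.List.sorted (xs ++ [x]) key true =
      PySem.List.insertBy (fun a b => decide (key b < key a)) x (PySem.List.sorted xs key true) := by
  rw [PySem.List.sorted_rev_eq_foldl_insertBy, PySem.List.sorted_rev_eq_foldl_insertBy,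
    List.foldl_append]
  rfl

-- stable descending sort commutes with filter
theorem pv_sorted_rev_filter {α κ : Type} [LinearOrder κ] (key : α → κ) (P : α → Bool)
    (xs : List α) :
    PySem.List.sorted (xs.filter P) key true = (PySem.List.sorted xs key true).filter P := by
  induction xs using List.reverseRecOn with
  | nil => rfl
  | append_singleton ys x ih =>
    rw [pv_sorted_rev_append_singleton,
      pv_filter_insertBy key P x _ (PySem.List.sorted_pairwise_rev ys key)]
    by_cases hx : P x
    · rw [if_pos hx, ← ih]
      have h1 : (ys ++ [x]).filter P = ys.filter P ++ [x] := by
        rw [List.filter_append]; simp [List.filter_cons, hx]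
      rw [h1, pv_sorted_rev_append_singleton]
    · rw [if_neg hx, ← ih]
      have h1 : (ys ++ [x]).filter P = ys.filter P := by
        rw [List.filter_append]; simp [List.filter_cons, hx]
      rw [h1]

-- Python max(key=…) is the head of the reverse-sorted list
theorem pv_max?_eq_head?_sorted_rev {α κ : Type} [LinearOrder κ] (key : α → κ) (ys : List α) :
    PySem.List.max? ys key = (PySem.List.sorted ys key true).head? := by
  induction ys using List.reverseRecOn with
  | nil => rfl
  | append_singleton zs x ih =>
    rw [pv_sorted_rev_append_singleton]
    have hstep : PySem.List.max? (zs ++ [x]) key =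
        (match PySem.List.max? zs key with
         | none => some x
         | some m => if key m < key x then some x else some m) := by
      unfold PySem.List.max?
      rw [List.foldl_append]
      rfl
    rw [hstep, ih]
    cases hs : PySem.List.sorted zs key true with
    | nil => simp [PySem.List.insertBy]
    | cons z t =>
      by_cases h : key z < key x <;> simp [PySem.List.insertBy, h]

-- find? of a predicate is the head of the filtered list
theorem pv_find?_eq_head?_filter {α : Type} (P : α → Bool) (l : List α) :
    l.find? P = (l.filter P).head? := by
  induction l with
  | nil => rfl
  | cons y ys ih =>
    rw [List.find?_cons, List.filter_cons]
    cases hy : P y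
    · exact ih
    · rfl

-- first substring match in the length-descending sort = longest match in native order
theorem pv_first_match_eq_max {α κ : Type} [LinearOrder κ] (key : α → κ) (P : α → Bool)
    (xs : List α) :
    (PySem.List.sorted xs key true).find? P = PySem.List.max? (xs.filter P) key := by
  rw [pv_find?_eq_head?_filter, pv_max?_eq_head?_sorted_rev, pv_sorted_rev_filter]

-- A's loop is a find? followed by the lookup on the found name
theorem pv_findBookA_eq_find? (filename_root : String) (bd : PySem.Dict String (List (String × Int)))
    (names : List String) :
    pvFindBookA filename_root bd names =
      (match names.find? (fun book => PySem.Str.isIn book filename_root) with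
       | none => "00-"
       | some book =>
           PySem.Str.zfill (PySem.Int.toStr ((PySem.Dict.ofList (bd.getD book [])).getD "num" 0)) 2
             ++ "-") := by
  induction names with
  | nil => rfl
  | cons b rest ih =>
    by_cases hb : PySem.Str.isIn b filename_root = true
    · have hb' : PySem.Chars.isIn b.toList filename_root.toList = true := by simpa using hb
      simp [pvFindBookA, List.find?_cons, hb']
    · have hb' : PySem.Chars.isIn b.toList filename_root.toList = false := by simpa using hb
      simp [pvFindBookA, List.find?_cons, hb', ih]

-- ===== VERDICT (by name: the statement is the Claim_ definition above) =====
theorem calculate_sort_field_spec : Claim_equal_calculate_sort_field := by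
  intro path_parts filename_root books _ _
  show calculate_sort_field path_parts filename_root books =
    calculate_sort_field_alt path_parts filename_root books
  simp only [calculate_sort_field, calculate_sort_field_alt, pv_findBookA_eq_find?,
    pv_first_match_eq_max]
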